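-- pv_equiv track=rewrite | github.com/SkinnyPigeon/serums_api_v3_docker | code/02-setup-datalake.py | rif_routes
-- ===== SOURCE A (Python) =====
-- def rif_routes(hospital_name):
--     rif_results = []
--     base = '/datalake/{}/000-RIF'.format(hospital_name)
--
-- # 100-Functional-Layer
--     group = '100-Functional-Layer'
--     end = ['100-Retrieve', '200-Assess', '300-Process', '400-Transform', '500-Organize', '600-Report']
--     for x in range(0, len(end)):
--         concatenated_route = base + '/' + group + '/' + end[x] + '/'
--         rif_results.append(concatenated_route)
--
-- # 200-Operational-Management-Layer
--     group = '200-Operational-Management-Layer'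
--     sub = '100-Crawler-Definitions'
--     end = ['100-Crawler-Master-Service-Definitions',
--         '200-Crawler-Workcell-Service-Definitions',
--         '300-Crawler-Input-Definitions',
--         '400-Crawler-Output-Definitions']
--
--     for x in range(0, len(end)):
--         concatenated_route = base + '/' + group + '/' + sub + '/' + end[x] + '/'
--         rif_results.append(concatenated_route)
--
--     sub = '200-Crawler-Management'
--     end = ['100-Retrieve-Population',
--         '200-Assess-Population',
--         '300-Process-Population',
--         '400-Transform-Population',
--         '500-Organise-Population',
--         '600-Report-Population']
--
--     for x in range(0, len(end)):
--         concatenated_route = base + '/' + group + '/' + sub + '/' + end[x] + '/'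
--         rif_results.append(concatenated_route)
--
--     sub = ['300-Parameters',
--        '400-Scheduling',
--        '500-Monitoring',
--        '600-Communication',
--        '700-Alerting',
--        '800-Codes-Management']
--
--     for x in range(0, len(sub)):
--         concatenated_route = base + '/' + group + '/' + sub[x] + '/'
--         rif_results.append(concatenated_route)
--
-- # 300-Audit-Balance-Control-Layer
--
--     group = '300-Audit-Balance-Control-Layer'
--     sub = ['100-Audit',
--         '200-Balance',
--         '300-Control']
--
--     for x in range(0, len(sub)):
--         concatenated_route = base + '/' + group + '/' + sub[x] + '/'
--         rif_results.append(concatenated_route)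
--
-- # 400-Utility-Layer
--
--     group = '400-Utility-Layer'
--     sub = ['100-Maintenance-Utilities',
--         '200-Data-Utilities',
--         '300-Processing-Utilities']
--
--     for x in range(0, len(sub)):
--         concatenated_route = base + '/' + group + '/' + sub[x] + '/'
--         rif_results.append(concatenated_route)
--
-- # 500-Business-Layer
--
--     group = '500-Business-Layer'
--     sub = ['100-Functional-Requirements',
--         '200-Non-functional-Requirements',
--         '300-Data-Profiles',
--         '400-Sun-Models']
--
--     for x in range(0, len(sub)):
--         concatenated_route = base + '/' + group + '/' + sub[x] + '/'
--         rif_results.append(concatenated_route)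
--
-- # Return results
--     return rif_results
-- ===== SOURCE B (Python) =====
-- def rif_routes(hospital_name):
--     base = '/datalake/{}/000-RIF'.format(hospital_name)
--     spec = [
--         ('100-Functional-Layer', None,
--          ['100-Retrieve', '200-Assess', '300-Process', '400-Transform',
--           '500-Organize', '600-Report']),
--         ('200-Operational-Management-Layer', '100-Crawler-Definitions',
--          ['100-Crawler-Master-Service-Definitions',
--           '200-Crawler-Workcell-Service-Definitions',
--           '300-Crawler-Input-Definitions',
--           '400-Crawler-Output-Definitions']),
--         ('200-Operational-Management-Layer', '200-Crawler-Management',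
--          ['100-Retrieve-Population', '200-Assess-Population',
--           '300-Process-Population', '400-Transform-Population',
--           '500-Organise-Population', '600-Report-Population']),
--         ('200-Operational-Management-Layer', None,
--          ['300-Parameters', '400-Scheduling', '500-Monitoring',
--           '600-Communication', '700-Alerting', '800-Codes-Management']),
--         ('300-Audit-Balance-Control-Layer', None,
--          ['100-Audit', '200-Balance', '300-Control']),
--         ('400-Utility-Layer', None,
--          ['100-Maintenance-Utilities', '200-Data-Utilities',
--           '300-Processing-Utilities']),
--         ('500-Business-Layer', None,
--          ['100-Functional-Requirements', '200-Non-functional-Requirements',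
--           '300-Data-Profiles', '400-Sun-Models']),
--     ]
--     routes = []
--     for group, sub, ends in spec:
--         for end in ends:
--             parts = [group] + ([sub] if sub is not None else []) + [end]
--             routes.append(base + '/' + '/'.join(parts) + '/')
--     return routes
-- ===== Notes on version B (the rewrite author's own statement) =====
-- stated objective: simpler
-- what changed: Replaces A's seven hard-coded shape-specific loop blocks with one uniform traversal of a nested spec table of (group, optional sub, end segments) entries, joining the parts per route.
import Mathlib
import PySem

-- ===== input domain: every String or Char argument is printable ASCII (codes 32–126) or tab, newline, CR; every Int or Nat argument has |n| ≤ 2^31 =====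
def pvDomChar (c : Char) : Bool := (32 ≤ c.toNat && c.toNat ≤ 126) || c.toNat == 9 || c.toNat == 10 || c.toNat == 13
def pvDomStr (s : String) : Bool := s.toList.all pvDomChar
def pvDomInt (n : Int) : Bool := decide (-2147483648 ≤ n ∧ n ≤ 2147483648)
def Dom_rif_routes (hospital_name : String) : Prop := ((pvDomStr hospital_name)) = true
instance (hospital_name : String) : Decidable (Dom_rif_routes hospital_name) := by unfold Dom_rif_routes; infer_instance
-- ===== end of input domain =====

-- B replaces A's seven hard-coded loop blocks with a single uniform traversal of a nested spec table (simpler).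


-- ===== PORT A =====
def rif_routes (hospital_name : String) : List String :=
  let rif_results : List String := []
  let base := "/datalake/" ++ hospital_name ++ "/000-RIF"
  -- 100-Functional-Layer
  let group := "100-Functional-Layer"
  let «end» := ["100-Retrieve", "200-Assess", "300-Process", "400-Transform", "500-Organize", "600-Report"]
  let rif_results := «end».foldl (fun acc e => acc ++ [base ++ "/" ++ group ++ "/" ++ e ++ "/"]) rif_results
  -- 200-Operational-Management-Layer
  let group := "200-Operational-Management-Layer"
  let sub := "100-Crawler-Definitions"
  let «end» := ["100-Crawler-Master-Service-Definitions",
    "200-Crawler-Workcell-Service-Definitions",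
    "300-Crawler-Input-Definitions",
    "400-Crawler-Output-Definitions"]
  let rif_results := «end».foldl (fun acc e => acc ++ [base ++ "/" ++ group ++ "/" ++ sub ++ "/" ++ e ++ "/"]) rif_results
  let sub := "200-Crawler-Management"
  let «end» := ["100-Retrieve-Population",
    "200-Assess-Population",
    "300-Process-Population",
    "400-Transform-Population",
    "500-Organise-Population",
    "600-Report-Population"]
  let rif_results := «end».foldl (fun acc e => acc ++ [base ++ "/" ++ group ++ "/" ++ sub ++ "/" ++ e ++ "/"]) rif_results
  let subs := ["300-Parameters",
    "400-Scheduling",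
    "500-Monitoring",
    "600-Communication",
    "700-Alerting",
    "800-Codes-Management"]
  let rif_results := subs.foldl (fun acc s => acc ++ [base ++ "/" ++ group ++ "/" ++ s ++ "/"]) rif_results
  -- 300-Audit-Balance-Control-Layer
  let group := "300-Audit-Balance-Control-Layer"
  let subs := ["100-Audit", "200-Balance", "300-Control"]
  let rif_results := subs.foldl (fun acc s => acc ++ [base ++ "/" ++ group ++ "/" ++ s ++ "/"]) rif_results
  -- 400-Utility-Layer
  let group := "400-Utility-Layer"
  let subs := ["100-Maintenance-Utilities", "200-Data-Utilities", "300-Processing-Utilities"]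
  let rif_results := subs.foldl (fun acc s => acc ++ [base ++ "/" ++ group ++ "/" ++ s ++ "/"]) rif_results
  -- 500-Business-Layer
  let group := "500-Business-Layer"
  let subs := ["100-Functional-Requirements",
    "200-Non-functional-Requirements",
    "300-Data-Profiles",
    "400-Sun-Models"]
  let rif_results := subs.foldl (fun acc s => acc ++ [base ++ "/" ++ group ++ "/" ++ s ++ "/"]) rif_results
  rif_results

-- ===== PORT B =====
-- B: one uniform traversal over a nested spec table (group, optional sub, end segments)
def rifSpec : List (String × Option String × List String) :=
  [("100-Functional-Layer", none,
     ["100-Retrieve", "200-Assess", "300-Process", "400-Transform", "500-Organize", "600-Report"]),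
   ("200-Operational-Management-Layer", some "100-Crawler-Definitions",
     ["100-Crawler-Master-Service-Definitions",
      "200-Crawler-Workcell-Service-Definitions",
      "300-Crawler-Input-Definitions",
      "400-Crawler-Output-Definitions"]),
   ("200-Operational-Management-Layer", some "200-Crawler-Management",
     ["100-Retrieve-Population", "200-Assess-Population",
      "300-Process-Population", "400-Transform-Population",
      "500-Organise-Population", "600-Report-Population"]),
   ("200-Operational-Management-Layer", none,
     ["300-Parameters", "400-Scheduling", "500-Monitoring",
      "600-Communication", "700-Alerting", "800-Codes-Management"]),
   ("300-Audit-Balance-Control-Layer", none,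
     ["100-Audit", "200-Balance", "300-Control"]),
   ("400-Utility-Layer", none,
     ["100-Maintenance-Utilities", "200-Data-Utilities", "300-Processing-Utilities"]),
   ("500-Business-Layer", none,
     ["100-Functional-Requirements", "200-Non-functional-Requirements",
      "300-Data-Profiles", "400-Sun-Models"])]

def rif_routes_alt (hospital_name : String) : List String :=
  let base := "/datalake/" ++ hospital_name ++ "/000-RIF"
  rifSpec.foldl (fun routes spec =>
    match spec with
    | (group, sub, ends) =>
      ends.foldl (fun routes e =>
        let parts := [group] ++ (match sub with | some s => [s] | none => []) ++ [e]
        routes ++ [base ++ "/" ++ String.intercalate "/" parts ++ "/"]) routes) []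

-- ===== PRECONDITION & SPEC =====
def Spec_rif_routes (hospital_name : String) (out : List String) : Prop := out = rif_routes_alt hospital_name
instance (hospital_name : String) (out : List String) : Decidable (Spec_rif_routes hospital_name out) := by unfold Spec_rif_routes; infer_instance

-- ===== CLAIM (what is proved, stated in full; the proofs are below) =====
def Claim_equal_rif_routes : Prop := ∀ (hospital_name : String), Dom_rif_routes hospital_name → Spec_rif_routes hospital_name (rif_routes hospital_name)

-- ===== LEMMAS AND PROOFS =====

-- ===== VERDICT (by name: the statement is the Claim_ definition above) =====
theorem rif_routes_spec : Claim_equal_rif_routes := by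
  intro h _
  unfold Spec_rif_routes rif_routes rif_routes_alt rifSpec
  simp [List.foldl, String.intercalate, String.append_assoc]
  decide
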